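-- pv_equiv track=rewrite | github.com/RahulKrishna-A/DSA-Leetcode | GeeksForGeeks/Intersection of two arrays.py | NumberofElementsInIntersection
-- ===== SOURCE A (Python) =====
-- def NumberofElementsInIntersection(a, b, n, m):
--     # return: expected length of the intersection array.
--
--     # code here
--     hash1 = {}
--     count = 0
--     b = set(b)
--     for i in a:
--         if i in hash1:
--             hash1[i] += 1
--         else:
--             hash1[i] = 1
--     for i in b:
--         if i in hash1:
--             count += 1
--     return count
-- ===== SOURCE B (Python) =====
-- def NumberofElementsInIntersection(a, b, n, m):
--     sa = sorted(set(a))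
--     sb = sorted(set(b))
--     i = j = count = 0
--     while i < len(sa) and j < len(sb):
--         if sa[i] < sb[j]:
--             i += 1
--         elif sb[j] < sa[i]:
--             j += 1
--         else:
--             count += 1
--             i += 1
--             j += 1
--     return count
-- ===== Notes on version B (the rewrite author's own statement) =====
-- stated objective: alternative
-- what changed: Replaces the hash-counter dict plus membership loop with sorting the deduplicated arrays and a two-pointer merge scan that counts equal elements.
import Mathlib
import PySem

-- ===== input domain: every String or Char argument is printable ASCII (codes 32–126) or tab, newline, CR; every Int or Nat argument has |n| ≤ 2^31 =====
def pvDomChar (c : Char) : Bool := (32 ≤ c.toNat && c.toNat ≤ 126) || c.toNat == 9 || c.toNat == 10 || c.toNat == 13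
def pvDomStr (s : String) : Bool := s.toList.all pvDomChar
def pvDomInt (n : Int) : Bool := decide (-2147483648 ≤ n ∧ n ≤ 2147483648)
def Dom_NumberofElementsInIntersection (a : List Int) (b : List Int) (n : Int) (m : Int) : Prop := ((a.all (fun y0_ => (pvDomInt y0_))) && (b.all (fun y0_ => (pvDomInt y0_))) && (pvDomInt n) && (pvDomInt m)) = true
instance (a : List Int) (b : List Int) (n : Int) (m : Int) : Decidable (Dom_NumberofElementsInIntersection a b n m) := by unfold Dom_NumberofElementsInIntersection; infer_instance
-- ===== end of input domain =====

-- B replaces A's hash-counter dict and membership loop with sorting the deduplicated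
-- arrays and a two-pointer merge scan (objective: alternative algorithm, same result).

-- ===== PORT A =====
def NumberofElementsInIntersection (a : List Int) (b : List Int) (n : Int) (m : Int) : Int :=
  let hash1 : PySem.Dict Int Int := PySem.Dict.empty
  let count : Int := 0
  let bset : PySem.Set Int := PySem.Set.ofList b
  -- for i in a: if i in hash1: hash1[i] += 1 else: hash1[i] = 1
  let hash1 := a.foldl (fun d i => if d.contains i then d.modify i 0 (· + 1) else d.insert i 1) hash1
  -- for i in b(set): if i in hash1: count += 1
  let count := bset.foldl (fun c i => if hash1.contains i then c + 1 else c) count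
  count

-- ===== PORT B =====
-- the two-pointer while loop of Source B, structurally recursive on the two sorted lists
def pvMergeCount : List Int → List Int → Int
  | [], _ => 0
  | _ :: _, [] => 0
  | x :: xs, y :: ys =>
    if x < y then pvMergeCount xs (y :: ys)
    else if y < x then pvMergeCount (x :: xs) ys
    else 1 + pvMergeCount xs ys

def NumberofElementsInIntersection_alt (a : List Int) (b : List Int) (n : Int) (m : Int) : Int :=
  let sa := PySem.List.sorted (PySem.Set.ofList a) (fun x => x) false   -- sorted(set(a))
  let sb := PySem.List.sorted (PySem.Set.ofList b) (fun x => x) false   -- sorted(set(b))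
  pvMergeCount sa sb

-- ===== PRECONDITION & SPEC =====
def Spec_NumberofElementsInIntersection (a : List Int) (b : List Int) (n : Int) (m : Int) (out : Int) : Prop := out = NumberofElementsInIntersection_alt a b n m
instance (a : List Int) (b : List Int) (n : Int) (m : Int) (out : Int) : Decidable (Spec_NumberofElementsInIntersection a b n m out) := by unfold Spec_NumberofElementsInIntersection; infer_instance

-- ===== CLAIM (what is proved, stated in full; the proofs are below) =====
def Claim_equal_NumberofElementsInIntersection : Prop := ∀ (a : List Int) (b : List Int) (n : Int) (m : Int), Dom_NumberofElementsInIntersection a b n m → Spec_NumberofElementsInIntersection a b n m (NumberofElementsInIntersection a b n m)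

-- ===== LEMMAS AND PROOFS =====

-- |{x ∈ xs : x ∈ ys}| = |{y ∈ ys : y ∈ xs}| for duplicate-free lists (both are |xs ∩ ys| as finite sets)
lemma countP_mem_comm {α : Type} [DecidableEq α] [BEq α] [LawfulBEq α]
    (xs ys : List α) (hx : xs.Nodup) (hy : ys.Nodup) :
    xs.countP (fun x => ys.contains x) = ys.countP (fun y => xs.contains y) := by
  have e : ∀ (u v : List α), u.Nodup →
      u.countP (fun x => v.contains x) = (u.toFinset ∩ v.toFinset).card := by
    intro u v hu
    rw [List.countP_eq_length_filter, ← List.toFinset_card_of_nodup (hu.filter _),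
      List.toFinset_filter]
    congr 1
    ext x
    simp
  rw [e xs ys hx, e ys xs hy, Finset.inter_comm]

-- a key is in A's counter dict exactly when it was in the starting dict or occurs in a
lemma contains_foldA (a : List Int) (d : PySem.Dict Int Int) (x : Int) :
    (a.foldl (fun d i => if d.contains i then d.modify i 0 (· + 1) else d.insert i 1) d).contains x
      = (d.contains x || a.contains x) := by
  induction a generalizing d with
  | nil => simp
  | cons i t ih =>
    simp only [List.foldl_cons, ih]
    by_cases h : d.contains i = true <;> by_cases hxi : x = i
    all_goals first
      | (subst hxi; simp [h, PySem.Dict.contains_modify])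
      | simp [h, hxi, beq_eq_false_iff_ne.mpr hxi, PySem.Dict.contains_modify,
          PySem.Dict.contains_insert]

-- the two-pointer merge over strictly increasing lists counts the xs that occur in ys
lemma mergeCount_eq (xs ys : List Int) (hx : xs.Pairwise (· < ·)) (hy : ys.Pairwise (· < ·)) :
    pvMergeCount xs ys = ((xs.countP (fun x => ys.contains x) : Nat) : Int) := by
  induction xs, ys using pvMergeCount.induct with
  | case1 ys => simp [pvMergeCount]
  | case2 x xs => simp [pvMergeCount]
  | case3 x xs y ys hlt ih =>
    have hy' := List.pairwise_cons.mp hy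
    have hxny : x ∉ y :: ys := by
      intro hmem
      rcases List.mem_cons.mp hmem with h | h
      · omega
      · exact absurd (hy'.1 x h) (by omega)
    rw [pvMergeCount, if_pos hlt, ih (List.pairwise_cons.mp hx).2 hy,
      List.countP_cons_of_neg (by simpa using hxny)]
  | case4 x xs y ys hnlt hlt ih =>
    have hx' := List.pairwise_cons.mp hx
    rw [pvMergeCount, if_neg (by omega), if_pos hlt, ih hx (List.pairwise_cons.mp hy).2]
    congr 1
    apply List.countP_congr
    intro e he
    have hye : y < e := by
      rcases List.mem_cons.mp he with h | h
      · omega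
      · have := hx'.1 e h; omega
    simp
    omega
  | case5 x xs y ys h1 h2 ih =>
    have hxy : x = y := by omega
    have hx' := List.pairwise_cons.mp hx
    rw [pvMergeCount, if_neg (by omega), if_neg (by omega),
      ih hx'.2 (List.pairwise_cons.mp hy).2,
      List.countP_cons_of_pos (by simp [hxy])]
    have hstep : xs.countP (fun e => (y :: ys).contains e) = xs.countP (fun e => ys.contains e) := by
      apply List.countP_congr
      intro e he
      have hxe := hx'.1 e he
      simp
      omega
    rw [hstep]
    push_cast
    ring

-- ===== VERDICT (by name: the statement is the Claim_ definition above) =====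
theorem NumberofElementsInIntersection_spec : Claim_equal_NumberofElementsInIntersection := by
  intro a b n m _
  unfold Spec_NumberofElementsInIntersection
  simp only [NumberofElementsInIntersection, NumberofElementsInIntersection_alt]
  rw [PySem.List.foldl_if_add_one, mergeCount_eq _ _ (PySem.List.sorted_ofList_pairwise_lt a)
    (PySem.List.sorted_ofList_pairwise_lt b)]
  have key : (List.foldl (fun d i => if d.contains i then d.modify i 0 (· + 1) else d.insert i 1)
      (PySem.Dict.empty : PySem.Dict Int Int) a).contains = fun e => a.contains e := by
    funext e
    rw [contains_foldA]
    simp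
  rw [key]
  have hmem : (PySem.Set.ofList b).countP (fun e => a.contains e)
      = (PySem.Set.ofList b).countP (fun x => List.contains (PySem.Set.ofList a) x) := by
    apply List.countP_congr
    intro e _
    simp [PySem.Set.mem_ofList]
  rw [hmem, countP_mem_comm _ _ (PySem.Set.nodup_ofList b) (PySem.Set.nodup_ofList a)]
  have hc : (PySem.Set.ofList a).countP
      (fun x => (PySem.List.sorted (PySem.Set.ofList b) (fun x => x) false).contains x)
      = (PySem.Set.ofList a).countP (fun y => List.contains (PySem.Set.ofList b) y) := by
    apply List.countP_congr
    intro e _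
    have hpb := PySem.List.sorted_perm (PySem.Set.ofList b) (fun x => x) false
    simp [hpb.mem_iff]
  rw [((PySem.List.sorted_perm (PySem.Set.ofList a) (fun x => x) false)).countP_eq, hc]
  ring
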